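-- pv_equiv track=rewrite | github.com/pypi-data/pypi-mirror-390 | packages/chilo-api/chilo_api-2.0.2.tar.gz/chilo_api-2.0.2/chilo_api/core/validator/openapi.py | __replace_dynamic_files_with_variales
-- ===== SOURCE A (Python) =====
-- from typing import Dict, Any, List
--
-- def __replace_dynamic_files_with_variales(route_hyphonated: str) -> str:
--     replaced: List[str] = []
--     for route in route_hyphonated.split('/'):
--         route_variable: str = route
--         if route.startswith('-'):
--             dynamic_hyphonated: str = route.replace('-', '', 1)
--             dynamic_file: str = dynamic_hyphonated.replace('-', '_')
--             route_variable = f'{{{dynamic_file}}}'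
--         replaced.append(route_variable)
--     return '/'.join(replaced)
-- ===== SOURCE B (Python) =====
-- def __replace_dynamic_files_with_variales(route_hyphonated: str) -> str:
--     # Single left-to-right character scan instead of split/transform/join:
--     # at the start of each '/'-delimited segment, a '-' triggers consuming the
--     # rest of the segment and emitting it brace-wrapped with '-' -> '_'.
--     out = []
--     i = 0
--     n = len(route_hyphonated)
--     seg_start = True
--     while i < n:
--         c = route_hyphonated[i]
--         if seg_start and c == '-':
--             j = i + 1
--             while j < n and route_hyphonated[j] != '/':
--                 j += 1
--             out.append('{' + route_hyphonated[i + 1:j].replace('-', '_') + '}')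
--             i = j
--             seg_start = False
--         elif c == '/':
--             out.append('/')
--             i += 1
--             seg_start = True
--         else:
--             out.append(c)
--             i += 1
--             seg_start = False
--     return ''.join(out)
-- ===== Notes on version B (the rewrite author's own statement) =====
-- stated objective: alternative
-- what changed: Replaces A's split('/') / per-segment transform / '/'.join pipeline with a single left-to-right character scan that rewrites dynamic segments in place using a segment-start flag, never materialising the list of segments.
import Mathlib
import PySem

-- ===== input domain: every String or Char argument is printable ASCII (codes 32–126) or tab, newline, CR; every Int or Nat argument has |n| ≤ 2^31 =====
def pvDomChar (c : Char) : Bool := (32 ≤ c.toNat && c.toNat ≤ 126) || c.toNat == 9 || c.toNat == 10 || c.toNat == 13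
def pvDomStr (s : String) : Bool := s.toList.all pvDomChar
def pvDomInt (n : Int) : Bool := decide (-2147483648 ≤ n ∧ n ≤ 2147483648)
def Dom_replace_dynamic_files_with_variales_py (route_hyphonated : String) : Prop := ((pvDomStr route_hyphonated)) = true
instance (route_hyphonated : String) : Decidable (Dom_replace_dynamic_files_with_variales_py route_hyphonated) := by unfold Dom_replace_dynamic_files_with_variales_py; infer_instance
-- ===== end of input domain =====

-- B replaces A's split('/')/per-segment transform/'/'.join pipeline by a single
-- left-to-right character scan that rewrites dynamic segments in place (alternative
-- decomposition, same result; no speed claim).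

-- ===== PORT A =====
-- hand port of route.replace('-', '', 1) for this call site (old is the single char
-- '-', new is ''): drops the first '-' if any — exact for these arguments.
def pyReplaceHyphenOnce : List Char → List Char
  | [] => []
  | c :: t => if c = '-' then t else c :: pyReplaceHyphenOnce t

-- the loop body of A: one segment of the split, transformed
def aSegment (route : List Char) : List Char :=
  if PySem.Chars.startswith route ['-'] then
    '{' :: (PySem.Chars.replace (pyReplaceHyphenOnce route) ['-'] ['_'] ++ ['}'])
  else route

def replace_dynamic_files_with_variales_py (route_hyphonated : String) : String :=
  String.ofList (PySem.Chars.join ['/']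
    ((PySem.Chars.splitOn route_hyphonated.toList ['/']).foldl
      (fun replaced route => replaced ++ [aSegment route]) []))

-- ===== PORT B =====
-- the inner while loop of Source B: scan to the next '/' (or the end), returning the
-- scanned chars s[i+1:j] and the remainder starting at j
def bSeg : List Char → List Char × List Char
  | [] => ([], [])
  | c :: t => if c = '/' then ([], c :: t) else
      let p := bSeg t; (c :: p.1, p.2)

theorem bSeg_snd_length_le : ∀ (l : List Char), (bSeg l).2.length ≤ l.length
  | [] => Nat.le_refl _
  | c :: t => by
      by_cases h : c = '/' <;> simp [bSeg, h]
      exact Nat.le_succ_of_le (bSeg_snd_length_le t)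

-- the outer while loop of Source B (seg_start is the flag)
def scanB : List Char → Bool → List Char
  | [], _ => []
  | c :: t, segStart =>
    if segStart = true ∧ c = '-' then
      let p := bSeg t
      '{' :: (PySem.Chars.replace p.1 ['-'] ['_'] ++ '}' :: scanB p.2 false)
    else if c = '/' then '/' :: scanB t true
    else c :: scanB t false
termination_by l _ => l.length
decreasing_by
  · exact Nat.lt_succ_of_le (bSeg_snd_length_le t)
  · simp
  · simp

def replace_dynamic_files_with_variales_py_alt (route_hyphonated : String) : String :=
  String.ofList (scanB route_hyphonated.toList true)

-- ===== PRECONDITION & SPEC =====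
def Spec_replace_dynamic_files_with_variales_py (route_hyphonated : String) (out : String) : Prop := out = replace_dynamic_files_with_variales_py_alt route_hyphonated
instance (route_hyphonated : String) (out : String) : Decidable (Spec_replace_dynamic_files_with_variales_py route_hyphonated out) := by unfold Spec_replace_dynamic_files_with_variales_py; infer_instance

-- ===== CLAIM (what is proved, stated in full; the proofs are below) =====
def Claim_equal_replace_dynamic_files_with_variales_py : Prop := ∀ (route_hyphonated : String), Dom_replace_dynamic_files_with_variales_py route_hyphonated → Spec_replace_dynamic_files_with_variales_py route_hyphonated (replace_dynamic_files_with_variales_py route_hyphonated)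

-- ===== LEMMAS AND PROOFS =====

-- clean structural form of PySem.Chars.splitOn.go for the one-char separator '/'
def splitGo : List Char → List Char → List (List Char)
  | [], cur => [cur.reverse]
  | c :: t, cur => if c = '/' then cur.reverse :: splitGo t [] else splitGo t (c :: cur)

theorem splitOn_go_eq : ∀ (fuel : Nat) (l cur : List Char) (acc : List (List Char)), l.length < fuel →
    PySem.Chars.splitOn.go ['/'] fuel l cur acc = acc.reverse ++ splitGo l cur := by
  intro fuel
  induction fuel with
  | zero => intro l cur acc h; omega
  | succ n ih =>
    intro l cur acc h
    cases l with
    | nil => simp [PySem.Chars.splitOn.go, splitGo]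
    | cons c t =>
      rw [PySem.Chars.splitOn.go]
      by_cases hc : c = '/'
      · subst hc
        simp only [List.isPrefixOf, BEq.rfl, Bool.true_and, if_pos, List.length_cons,
          List.length_nil, List.drop_succ_cons, List.drop_zero]
        rw [ih t [] (cur.reverse :: acc) (by simpa using Nat.lt_of_succ_lt_succ h)]
        simp [splitGo]
      · have hpre : (['/'] : List Char).isPrefixOf (c :: t) = false := by
          simp [List.isPrefixOf]; exact fun hh => (hc hh.symm).elim
        simp only [hpre, if_neg Bool.false_ne_true]
        rw [ih t (c :: cur) acc (Nat.lt_of_succ_lt_succ h)]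
        simp [splitGo, hc]

theorem splitOn_eq (l : List Char) :
    PySem.Chars.splitOn l ['/'] = splitGo l [] := by
  rw [PySem.Chars.splitOn, splitOn_go_eq (l.length + 1) l [] [] (Nat.lt_succ_self _)]
  simp

theorem splitGo_decomp : ∀ (l cur : List Char), splitGo l cur =
    (cur.reverse ++ l.takeWhile (· ≠ '/')) ::
      (match l.dropWhile (· ≠ '/') with | [] => [] | _ :: t => splitGo t []) := by
  intro l
  induction l with
  | nil => intro cur; simp [splitGo]
  | cons c t ih =>
    intro cur
    by_cases hc : c = '/'
    · subst hc; simp [splitGo]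
    · simp only [splitGo, if_neg hc, ih (c :: cur), List.takeWhile_cons, List.dropWhile_cons]
      simp [hc]

theorem bSeg_eq (l : List Char) :
    bSeg l = (l.takeWhile (· ≠ '/'), l.dropWhile (· ≠ '/')) := by
  induction l with
  | nil => rfl
  | cons c t ih =>
    by_cases hc : c = '/'
    · subst hc; simp [bSeg]
    · simp [bSeg, hc, ih]

theorem scanB_false (l : List Char) : scanB l false =
    l.takeWhile (· ≠ '/') ++
      (match l.dropWhile (· ≠ '/') with | [] => [] | _ :: t => '/' :: scanB t true) := by
  induction l with
  | nil => simp [scanB]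
  | cons c t ih =>
    by_cases hc : c = '/'
    · subst hc; simp [scanB]
    · rw [scanB]
      simp [hc, ih]

theorem drop_head : ∀ (l : List Char) (c : Char) (t : List Char),
    l.dropWhile (· ≠ '/') = c :: t → c = '/' := by
  intro l
  induction l with
  | nil => intro c t h; simp [List.dropWhile] at h
  | cons a as ih =>
    intro c t h
    rw [List.dropWhile_cons] at h
    by_cases ha : a = '/'
    · rw [if_neg (by simp [ha])] at h
      injection h with h1 _
      exact h1 ▸ ha
    · rw [if_pos (by simp [ha])] at h
      exact ih c t h

theorem tail_eq (n : Nat)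
    (ih : ∀ l : List Char, l.length ≤ n →
      PySem.Chars.join ['/'] ((splitGo l []).map aSegment) = scanB l true)
    (t cur : List Char) (ht : t.length ≤ n) :
    PySem.Chars.join ['/'] ((splitGo t cur).map aSegment) =
      aSegment (cur.reverse ++ t.takeWhile (· ≠ '/')) ++
        (match t.dropWhile (· ≠ '/') with | [] => [] | _ :: t' => '/' :: scanB t' true) := by
  rw [splitGo_decomp t cur]
  rcases hdw : t.dropWhile (· ≠ '/') with _ | ⟨d, t'⟩
  · simp only [List.map_cons, List.map_nil, PySem.Chars.join_singleton, List.append_nil]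
  · have hlen := List.length_dropWhile_le (fun x => decide (x ≠ '/')) t
    rw [hdw] at hlen
    have ht' : t'.length ≤ n := by simp at hlen; omega
    simp only [List.map_cons]
    rw [splitGo_decomp t' [], List.map_cons, PySem.Chars.join_cons_cons,
      ← List.map_cons, ← splitGo_decomp t' [], ih t' ht']
    simp

theorem main_lemma : ∀ (n : Nat) (l : List Char), l.length ≤ n →
    PySem.Chars.join ['/'] ((splitGo l []).map aSegment) = scanB l true := by
  intro n
  induction n with
  | zero =>
    intro l h
    have : l = [] := List.length_eq_zero_iff.mp (Nat.le_zero.mp h)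
    subst this
    simp [splitGo, scanB, aSegment, PySem.Chars.startswith, List.isPrefixOf,
      PySem.Chars.join_singleton]
  | succ n ih =>
    intro l h
    cases l with
    | nil =>
      simp [splitGo, scanB, aSegment, PySem.Chars.startswith, List.isPrefixOf,
        PySem.Chars.join_singleton]
    | cons c t =>
      have ht : t.length ≤ n := Nat.le_of_succ_le_succ h
      by_cases hc : c = '/'
      · subst hc
        rw [show splitGo ('/' :: t) [] = [] :: splitGo t [] from by simp [splitGo]]
        rw [splitGo_decomp t [], List.map_cons, List.map_cons, PySem.Chars.join_cons_cons,
          ← List.map_cons, ← splitGo_decomp t [], ih t ht]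
        rw [scanB]
        simp [aSegment, PySem.Chars.startswith, List.isPrefixOf]
      · rw [show splitGo (c :: t) [] = splitGo t [c] from by simp [splitGo, hc]]
        rw [tail_eq n ih t [c] ht]
        by_cases hcm : c = '-'
        · subst hcm
          rw [scanB, bSeg_eq]
          rcases hdw : t.dropWhile (· ≠ '/') with _ | ⟨d, t'⟩
          · simp [aSegment, PySem.Chars.startswith, List.isPrefixOf,
              pyReplaceHyphenOnce, scanB]
          · have hd := drop_head t d t' hdw
            subst hd
            simp only [aSegment, PySem.Chars.startswith]
            rw [scanB]
            simp [pyReplaceHyphenOnce]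
        · rw [scanB, scanB_false t]
          have hcm' : ¬ '-' = c := fun hh => hcm hh.symm
          simp [aSegment, PySem.Chars.startswith, List.isPrefixOf, hc, hcm, hcm']

-- ===== VERDICT (by name: the statement is the Claim_ definition above) =====
theorem replace_dynamic_files_with_variales_py_spec : Claim_equal_replace_dynamic_files_with_variales_py := by
  intro s _
  unfold Spec_replace_dynamic_files_with_variales_py
  unfold replace_dynamic_files_with_variales_py replace_dynamic_files_with_variales_py_alt
  rw [PySem.List.foldl_append_singleton_eq_map, splitOn_eq, List.nil_append,
    main_lemma s.toList.length s.toList (Nat.le_refl _)]
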